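-- pv_equiv track=rewrite | github.com/itcv-GmbH/cpp-mcp-sdk | tools/checks/check_public_header_one_type.py | tokenize_cpp
-- ===== SOURCE A (Python) =====
-- from typing import List, Optional, Tuple
--
-- def tokenize_cpp(content: str) -> List[Tuple[str, str, int]]:
--     """
--     Tokenize a C++ source string into (kind, value, line_number) tuples.
--
--     Only emits the tokens needed by the one-type-per-header parser.
--     """
--     tokens: List[Tuple[str, str, int]] = []
--     i = 0
--     line_num = 1
--     n = len(content)
--
--     while i < n:
--         ch = content[i]
--
--         if ch == "\n":
--             line_num += 1
--             i += 1
--             continue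
--
--         if ch.isspace():
--             i += 1
--             continue
--
--         if ch.isalpha() or ch == "_":
--             start = i
--             i += 1
--             while i < n and (content[i].isalnum() or content[i] == "_"):
--                 i += 1
--             tokens.append(("identifier", content[start:i], line_num))
--             continue
--
--         if ch == ":" and i + 1 < n and content[i + 1] == ":":
--             tokens.append(("symbol", "::", line_num))
--             i += 2
--             continue
--
--         if ch in "{};<>:(),[]=":
--             tokens.append(("symbol", ch, line_num))
--
--         i += 1
--
--     return tokens
-- ===== SOURCE B (Python) =====
-- from typing import List, Tuple
--
-- def tokenize_cpp(content: str) -> List[Tuple[str, str, int]]: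
--     """Line-based DFA tokenizer: split on newlines (line numbers come from
--     enumerate) and run a one-pass state machine per line, carrying a partial
--     identifier buffer and a pending-colon flag."""
--     tokens: List[Tuple[str, str, int]] = []
--     for line_num, line in enumerate(content.split("\n"), 1):
--         ident = ""
--         pending_colon = False
--         for ch in line:
--             if ident and (ch.isalnum() or ch == "_"):
--                 ident += ch
--             elif ch.isalpha() or ch == "_":
--                 if pending_colon:
--                     tokens.append(("symbol", ":", line_num))
--                     pending_colon = False
--                 ident = ch
--             else:
--                 if ident:
--                     tokens.append(("identifier", ident, line_num))
--                     ident = ""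
--                 if ch == ":":
--                     if pending_colon:
--                         tokens.append(("symbol", "::", line_num))
--                         pending_colon = False
--                     else:
--                         pending_colon = True
--                 else:
--                     if pending_colon:
--                         tokens.append(("symbol", ":", line_num))
--                         pending_colon = False
--                     if ch in "{};<>(),[]=":
--                         tokens.append(("symbol", ch, line_num))
--         if ident:
--             tokens.append(("identifier", ident, line_num))
--         if pending_colon:
--             tokens.append(("symbol", ":", line_num))
--     return tokens
-- ===== Notes on version B (the rewrite author's own statement) =====
-- stated objective: alternative
-- what changed: Replaces the index-advancing scanner with lookahead (inner identifier loop, content[i+1] peek for the double colon) by a line-based one-pass state machine: split the text into lines so line numbers come from enumerate, then fold each line through a DFA carrying a partial-identifier buffer and a pending-colon flag, with no indices and no lookahead.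
import Mathlib
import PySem

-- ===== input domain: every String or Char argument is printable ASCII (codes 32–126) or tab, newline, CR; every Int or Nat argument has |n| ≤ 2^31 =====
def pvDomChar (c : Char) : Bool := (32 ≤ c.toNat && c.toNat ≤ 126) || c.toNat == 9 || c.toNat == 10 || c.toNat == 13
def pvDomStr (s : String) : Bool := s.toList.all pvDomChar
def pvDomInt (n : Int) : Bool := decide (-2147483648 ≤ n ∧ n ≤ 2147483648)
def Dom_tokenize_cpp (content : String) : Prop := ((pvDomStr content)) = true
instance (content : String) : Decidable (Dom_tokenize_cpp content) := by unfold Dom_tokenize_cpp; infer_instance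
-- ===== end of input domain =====

-- B replaces A's index-advancing scanner (inner identifier loop, content[i+1] lookahead)
-- by a line-based one-pass state machine: split on '\n' (line numbers from enumerate),
-- fold each line through a DFA carrying a partial-identifier buffer and a pending-colon flag.

-- ===== PORT A =====
-- inner 'while i < n and (content[i].isalnum() or content[i] == "_")' loop: returns the final i
def tcA_identEnd (cs : List Char) (n i : Nat) : Nat :=
  if _h : i < n then
    if PySem.Chars.isalnum (cs.getD i ' ') || cs.getD i ' ' == '_' then
      tcA_identEnd cs n (i + 1)
    else i
  else i
termination_by n - i

-- needed for the main loop's termination (the port cites it in decreasing_by)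
theorem tcA_identEnd_le (cs : List Char) (n i : Nat) : i ≤ tcA_identEnd cs n i := by
  fun_induction tcA_identEnd cs n i with
  | case1 i h hp ih => omega
  | case2 => omega
  | case3 => omega

-- the main 'while i < n' loop; Python's content[i] is cs.getD i ' ' (guard i < n makes it exact),
-- content[start:i] with 0 ≤ start ≤ i is (cs.drop start).take (i - start),
-- 'ch in "{};<>:(),[]="' is membership of the char in the list of those chars
def tcA_loop (cs : List Char) (n i : Nat) (line : Int)
    (tokens : List (String × String × Int)) : List (String × String × Int) :=
  if _h : i < n then
    if cs.getD i ' ' == '\n' then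
      tcA_loop cs n (i + 1) (line + 1) tokens
    else if PySem.Chars.isspace (cs.getD i ' ') then
      tcA_loop cs n (i + 1) line tokens
    else if PySem.Chars.isalpha (cs.getD i ' ') || cs.getD i ' ' == '_' then
      tcA_loop cs n (tcA_identEnd cs n (i + 1)) line
        (tokens ++ [("identifier", String.ofList ((cs.drop i).take (tcA_identEnd cs n (i + 1) - i)), line)])
    else if cs.getD i ' ' == ':' && decide (i + 1 < n) && (cs.getD (i + 1) ' ' == ':') then
      tcA_loop cs n (i + 2) line (tokens ++ [("symbol", "::", line)])
    else if ['{', '}', ';', '<', '>', ':', '(', ')', ',', '[', ']', '='].contains (cs.getD i ' ') then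
      tcA_loop cs n (i + 1) line (tokens ++ [("symbol", String.ofList [cs.getD i ' '], line)])
    else
      tcA_loop cs n (i + 1) line tokens
  else tokens
termination_by n - i
decreasing_by
  · omega
  · omega
  · have := tcA_identEnd_le cs n (i + 1); omega
  · omega
  · omega
  · omega

def tokenize_cpp (content : String) : List (String × String × Int) :=
  tcA_loop content.toList content.toList.length 0 1 []

-- ===== PORT B =====
def tcB_flushIdent (tokens : List (String × String × Int)) (ident : List Char) (ln : Int) :
    List (String × String × Int) :=
  if ident.isEmpty then tokens else tokens ++ [("identifier", String.ofList ident, ln)]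

def tcB_flushColon (tokens : List (String × String × Int)) (pending : Bool) (ln : Int) :
    List (String × String × Int) :=
  if pending then tokens ++ [("symbol", ":", ln)] else tokens

-- one DFA step over (tokens, ident buffer, pending-colon flag)
def tcB_step (ln : Int) (st : List (String × String × Int) × List Char × Bool) (ch : Char) :
    List (String × String × Int) × List Char × Bool :=
  if !st.2.1.isEmpty && (PySem.Chars.isalnum ch || ch == '_') then
    (st.1, st.2.1 ++ [ch], st.2.2)
  else if PySem.Chars.isalpha ch || ch == '_' then
    (tcB_flushColon st.1 st.2.2 ln, [ch], false)
  else
    let tokens := tcB_flushIdent st.1 st.2.1 ln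
    if ch == ':' then
      if st.2.2 then (tokens ++ [("symbol", "::", ln)], [], false)
      else (tokens, [], true)
    else
      let tokens := tcB_flushColon tokens st.2.2 ln
      if ['{', '}', ';', '<', '>', '(', ')', ',', '[', ']', '='].contains ch then
        (tokens ++ [("symbol", String.ofList [ch], ln)], [], false)
      else (tokens, [], false)

def tcB_line (tokens : List (String × String × Int)) (ln : Int) (line : List Char) :
    List (String × String × Int) :=
  let st := line.foldl (tcB_step ln) (tokens, [], false)
  tcB_flushColon (tcB_flushIdent st.1 st.2.1 ln) st.2.2 ln

-- content.split("\n") is List.splitOn '\n'; enumerate(lines, 1) is zipIdx 1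
def tokenize_cpp_alt (content : String) : List (String × String × Int) :=
  ((content.toList.splitOn '\n').zipIdx 1).foldl (fun tokens p => tcB_line tokens (p.2 : Int) p.1) []

-- ===== PRECONDITION & SPEC =====
def Spec_tokenize_cpp (content : String) (out : List (String × String × Int)) : Prop := out = tokenize_cpp_alt content
instance (content : String) (out : List (String × String × Int)) : Decidable (Spec_tokenize_cpp content out) := by unfold Spec_tokenize_cpp; infer_instance

-- ===== CLAIM (what is proved, stated in full; the proofs are below) =====
def Claim_equal_tokenize_cpp : Prop := ∀ (content : String), Dom_tokenize_cpp content → Spec_tokenize_cpp content (tokenize_cpp content)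

-- ===== LEMMAS AND PROOFS =====

-- identifier-continuation predicate shared by the proofs
def pvIdentCont (c : Char) : Bool := PySem.Chars.isalnum c || c == '_'

-- reference scanner: A's loop rewritten structurally on the remaining character list
def aScan : List Char → Int → List (String × String × Int) → List (String × String × Int)
  | [], _, tokens => tokens
  | c :: rest, line, tokens =>
    if c == '\n' then aScan rest (line + 1) tokens
    else if PySem.Chars.isspace c then aScan rest line tokens
    else if PySem.Chars.isalpha c || c == '_' then
      aScan (rest.dropWhile pvIdentCont) line
        (tokens ++ [("identifier", String.ofList (c :: rest.takeWhile pvIdentCont), line)])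
    else if c == ':' && (rest.head? == some ':') then
      aScan rest.tail line (tokens ++ [("symbol", "::", line)])
    else if ['{', '}', ';', '<', '>', ':', '(', ')', ',', '[', ']', '='].contains c then
      aScan rest line (tokens ++ [("symbol", String.ofList [c], line)])
    else aScan rest line tokens
termination_by cs => cs.length
decreasing_by
  · simp
  · simp
  · have := List.length_dropWhile_le pvIdentCont rest; simp; omega
  · simp
  · simp
  · simp

-- B's per-line run, rephrased as recursion over the list of lines with a line counter
def bLines : List (List Char) → Int → List (String × String × Int) → List (String × String × Int)
  | [], _, tokens => tokens
  | l :: ls, line, tokens => bLines ls (line + 1) (tcB_line tokens line l)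

def tcB_finish (ln : Int) (st : List (String × String × Int) × List Char × Bool) :
    List (String × String × Int) :=
  tcB_flushColon (tcB_flushIdent st.1 st.2.1 ln) st.2.2 ln

def pvIdentOk : List Char → Prop
  | [] => True
  | c :: t => (PySem.Chars.isalpha c || c == '_') = true ∧ ∀ x ∈ t, pvIdentCont x = true

-- ---- bridge 1: A's index loop = aScan ----

theorem identEnd_eq (cs : List Char) (i : Nat) :
    tcA_identEnd cs cs.length i = i + ((cs.drop i).takeWhile pvIdentCont).length := by
  fun_induction tcA_identEnd cs cs.length i with
  | case1 i h hp ih =>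
    rw [List.drop_eq_getElem_cons h, List.takeWhile_cons]
    rw [List.getD_eq_getElem cs ' ' h] at hp
    simp only [pvIdentCont, hp, if_true, List.length_cons, ih]
    omega
  | case2 i h hp =>
    rw [List.drop_eq_getElem_cons h, List.takeWhile_cons]
    rw [List.getD_eq_getElem cs ' ' h] at hp
    simp [pvIdentCont, hp]
  | case3 i h =>
    rw [List.drop_eq_nil_of_le (by omega), List.takeWhile_nil]
    simp


theorem drop_len_takeWhile (p : Char → Bool) (l : List Char) :
    List.drop (l.takeWhile p).length l = l.dropWhile p := by
  induction l with
  | nil => simp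
  | cons c t ih =>
    rw [List.takeWhile_cons, List.dropWhile_cons]
    by_cases hp : p c
    · simp [hp, ih]
    · simp [hp]

theorem colon_cond (cs : List Char) (i : Nat) (h : i < cs.length) :
    (cs.getD i ' ' == ':' && decide (i + 1 < cs.length) && (cs.getD (i + 1) ' ' == ':'))
      = (cs[i] == ':' && ((List.drop (i + 1) cs).head? == some ':')) := by
  by_cases h2 : i + 1 < cs.length
  · rw [List.getD_eq_getElem cs ' ' h, List.getD_eq_getElem cs ' ' h2]
    simp [List.head?_drop, List.getElem?_eq_getElem h2, h2]
  · rw [List.getD_eq_getElem cs ' ' h]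
    have : List.getD cs (i + 1) ' ' = ' ' := List.getD_eq_default _ _ (by omega)
    simp [this, List.head?_drop, List.getElem?_eq_none (by omega : cs.length ≤ i + 1), h2]

theorem loop_eq_aScan (cs : List Char) (i : Nat) (line : Int)
    (tokens : List (String × String × Int)) :
    tcA_loop cs cs.length i line tokens = aScan (cs.drop i) line tokens := by
  fun_induction tcA_loop cs cs.length i line tokens with
  | case1 i line tokens h hnl ih =>
    rw [List.getD_eq_getElem cs ' ' h] at hnl
    rw [List.drop_eq_getElem_cons h, aScan, if_pos hnl, ih]
  | case2 i line tokens h hnl hsp ih =>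
    rw [List.getD_eq_getElem cs ' ' h] at hnl hsp
    rw [List.drop_eq_getElem_cons h, aScan, if_neg (by simpa using hnl), if_pos hsp, ih]
  | case3 i line tokens h hnl hsp hal ih =>
    rw [List.getD_eq_getElem cs ' ' h] at hnl hsp hal
    have he := identEnd_eq cs (i + 1)
    have htw : (List.drop (i + 1) cs).take ((List.takeWhile pvIdentCont (List.drop (i + 1) cs)).length)
        = List.takeWhile pvIdentCont (List.drop (i + 1) cs) :=
      (List.prefix_iff_eq_take.mp (List.takeWhile_prefix pvIdentCont)).symm
    have hTok : List.take (tcA_identEnd cs cs.length (i + 1) - i) (List.drop i cs)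
        = cs[i] :: List.takeWhile pvIdentCont (List.drop (i + 1) cs) := by
      rw [List.drop_eq_getElem_cons h, he,
        (by omega : i + 1 + (List.takeWhile pvIdentCont (List.drop (i + 1) cs)).length - i
          = (List.takeWhile pvIdentCont (List.drop (i + 1) cs)).length + 1),
        List.take_succ_cons, htw]
    have hDrop : List.drop (tcA_identEnd cs cs.length (i + 1)) cs
        = List.dropWhile pvIdentCont (List.drop (i + 1) cs) := by
      rw [he, ← List.drop_drop, drop_len_takeWhile]
    rw [hTok, hDrop] at ih
    rw [hTok, List.drop_eq_getElem_cons h, aScan, if_neg (by simpa using hnl),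
      if_neg (by simpa using hsp), if_pos hal, ih]
  | case4 i line tokens h hnl hsp hal hcol ih =>
    rw [colon_cond cs i h] at hcol
    rw [List.getD_eq_getElem cs ' ' h] at hnl hsp hal
    rw [List.drop_eq_getElem_cons h, aScan, if_neg (by simpa using hnl),
      if_neg (by simpa using hsp), if_neg (by simpa using hal), if_pos hcol,
      List.tail_drop, ih]
  | case5 i line tokens h hnl hsp hal hcol hsym ih =>
    rw [colon_cond cs i h] at hcol
    rw [List.getD_eq_getElem cs ' ' h] at hnl hsp hal hsym
    rw [List.drop_eq_getElem_cons h, aScan, if_neg (by simpa using hnl),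
      if_neg (by simpa using hsp), if_neg (by simpa using hal),
      if_neg (by simpa using hcol), if_pos hsym]
    simp only [List.getD_eq_getElem cs ' ' h] at ih ⊢
    exact ih
  | case6 i line tokens h hnl hsp hal hcol hsym ih =>
    rw [colon_cond cs i h] at hcol
    rw [List.getD_eq_getElem cs ' ' h] at hnl hsp hal hsym
    rw [List.drop_eq_getElem_cons h, aScan, if_neg (by simpa using hnl),
      if_neg (by simpa using hsp), if_neg (by simpa using hal),
      if_neg (by simpa using hcol), if_neg (by simpa using hsym), ih]
  | case7 i line tokens h =>
    rw [List.drop_eq_nil_of_le (by omega), aScan]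

-- ---- bridge 2: aScan splits at newlines ----

theorem aScan_nil (line : Int) (tokens : List (String × String × Int)) :
    aScan [] line tokens = tokens := by rw [aScan]

theorem aScan_nl (rest : List Char) (line : Int) (tokens : List (String × String × Int)) :
    aScan ('\n' :: rest) line tokens = aScan rest (line + 1) tokens := by
  rw [aScan]
  simp [List.head?_cons, show PySem.Chars.isspace ':' = false from by decide,
    show PySem.Chars.isalpha ':' = false from by decide]

theorem takeWhile_nl (l rest : List Char) :
    List.takeWhile pvIdentCont (l ++ '\n' :: rest) = List.takeWhile pvIdentCont l := by
  induction l with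
  | nil =>
    have : pvIdentCont '\n' = false := by decide
    simp [List.takeWhile_cons, this]
  | cons c t ih =>
    rw [List.cons_append, List.takeWhile_cons, List.takeWhile_cons]
    by_cases hp : pvIdentCont c = true
    · simp [hp, ih]
    · simp [hp]

theorem dropWhile_nl (l rest : List Char) :
    List.dropWhile pvIdentCont (l ++ '\n' :: rest) = List.dropWhile pvIdentCont l ++ '\n' :: rest := by
  induction l with
  | nil =>
    have : pvIdentCont '\n' = false := by decide
    simp [List.dropWhile_cons, this]
  | cons c t ih =>
    rw [List.cons_append, List.dropWhile_cons, List.dropWhile_cons]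
    by_cases hp : pvIdentCont c = true
    · simp [hp, ih]
    · simp [hp]

theorem aScan_append_nl_aux (N : Nat) : ∀ (l rest : List Char) (line : Int)
    (tokens : List (String × String × Int)), l.length ≤ N → '\n' ∉ l →
    aScan (l ++ '\n' :: rest) line tokens = aScan rest (line + 1) (aScan l line tokens) := by
  induction N with
  | zero =>
    intro l rest line tokens hlen _
    have : l = [] := List.eq_nil_of_length_eq_zero (by omega)
    subst this
    rw [List.nil_append, aScan_nl, aScan_nil]
  | succ N ih =>
    intro l rest line tokens hlen hnl
    match l with
    | [] => rw [List.nil_append, aScan_nl, aScan_nil]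
    | c :: l' =>
      simp only [List.mem_cons, not_or] at hnl
      have hc : (c == '\n') = false := beq_eq_false_iff_ne.mpr (fun e => hnl.1 e.symm)
      have hl' : '\n' ∉ l' := hnl.2
      have hlen' : l'.length ≤ N := by simp at hlen; omega
      rw [List.cons_append, aScan, aScan]
      simp only [hc, Bool.false_eq_true, if_false]
      by_cases hsp : PySem.Chars.isspace c = true
      · simp only [hsp, if_true]
        exact ih l' rest line tokens hlen' hl'
      · simp only [hsp, if_false]
        by_cases hal : (PySem.Chars.isalpha c || c == '_') = true
        · simp only [hal, if_true, takeWhile_nl, dropWhile_nl]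
          exact ih (List.dropWhile pvIdentCont l') rest line _
            (le_trans (List.length_dropWhile_le _ _) hlen')
            (fun hm => hl' ((List.dropWhile_sublist (p := pvIdentCont)).mem hm))
        · simp only [hal, if_false]
          have hhead : ((l' ++ '\n' :: rest).head? == some ':') = (l'.head? == some ':') := by
            cases l' with
            | nil => simp
            | cons c2 t2 => simp
          rw [hhead]
          by_cases hcol : (c == ':' && (l'.head? == some ':')) = true
          · simp only [hcol, if_true]
            cases l' with
            | nil => simp at hcol
            | cons c2 t2 =>
              simp only [List.cons_append, List.tail_cons]
              have ht2 : '\n' ∉ t2 := fun hm => hl' (List.mem_cons_of_mem _ hm)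
              have : t2.length ≤ N := by simp at hlen'; omega
              exact ih t2 rest line _ this ht2
          · simp only [hcol, if_false]
            by_cases hsym : (['{', '}', ';', '<', '>', ':', '(', ')', ',', '[', ']', '='].contains c) = true
            · simp only [hsym, if_true]
              exact ih l' rest line _ hlen' hl'
            · simp only [hsym, if_false]
              exact ih l' rest line tokens hlen' hl'

theorem aScan_append_nl (l : List Char) (rest : List Char) (line : Int)
    (tokens : List (String × String × Int)) (h : '\n' ∉ l) :
    aScan (l ++ '\n' :: rest) line tokens = aScan rest (line + 1) (aScan l line tokens) :=
  aScan_append_nl_aux l.length l rest line tokens le_rfl h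

-- ---- bridge 3: B's DFA on a newline-free line = aScan on that line ----

theorem alpha_not_space (c : Char) (h : PySem.Chars.isalpha c = true) :
    PySem.Chars.isspace c = false := by
  simp only [PySem.Chars.isalpha, PySem.Chars.isupper, PySem.Chars.islower, Char.le_def,
    UInt32.le_iff_toNat_le, Bool.or_eq_true, Bool.and_eq_true, decide_eq_true_eq,
    show 'A'.val.toNat = 65 from rfl, show 'Z'.val.toNat = 90 from rfl,
    show 'a'.val.toNat = 97 from rfl, show 'z'.val.toNat = 122 from rfl] at h
  simp only [PySem.Chars.isspace, Char.toNat, Bool.or_eq_false_iff, Bool.and_eq_false_iff,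
    decide_eq_false_iff_not, not_le]
  omega

theorem start_ne (c : Char) (h : (PySem.Chars.isalpha c || c == '_') = true) :
    (c == '\n') = false ∧ (c == ':') = false := by
  rcases (by simpa using h : PySem.Chars.isalpha c = true ∨ c = '_') with ha | he
  · constructor <;>
      (apply beq_eq_false_iff_ne.mpr; intro e; subst e; exact absurd ha (by decide))
  · subst he; decide
theorem start_not_space (c : Char) (h : (PySem.Chars.isalpha c || c == '_') = true) :
    PySem.Chars.isspace c = false := by
  rcases (by simpa using h : PySem.Chars.isalpha c = true ∨ c = '_') with ha | he
  · exact alpha_not_space c ha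
  · subst he; decide
theorem start_cont (c : Char) (h : (PySem.Chars.isalpha c || c == '_') = true) :
    pvIdentCont c = true := by
  rcases (by simpa using h : PySem.Chars.isalpha c = true ∨ c = '_') with ha | he
  · simp [pvIdentCont, PySem.Chars.isalnum, ha]
  · subst he; decide

theorem symB_not_space (c : Char)
    (h : (['{', '}', ';', '<', '>', '(', ')', ',', '[', ']', '='].contains c) = true) :
    PySem.Chars.isspace c = false := by
  have hm : c ∈ ['{', '}', ';', '<', '>', '(', ')', ',', '[', ']', '='] := by simpa using h
  fin_cases hm <;> decide
theorem symA_split (c : Char) :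
    (['{', '}', ';', '<', '>', ':', '(', ')', ',', '[', ']', '='].contains c)
      = ((c == ':') || ['{', '}', ';', '<', '>', '(', ')', ',', '[', ']', '='].contains c) := by
  by_cases hc : c = ':'
  · subst hc; decide
  · have hcb : (c == ':') = false := beq_eq_false_iff_ne.mpr hc
    simp only [List.contains_cons, List.contains_nil, hcb, Bool.false_or, Bool.or_false]

-- aScan single-step evaluation lemmas
theorem aScan_space (c : Char) (rest : List Char) (ln : Int)
    (tokens : List (String × String × Int)) (h1 : (c == '\n') = false)
    (h2 : PySem.Chars.isspace c = true) :
    aScan (c :: rest) ln tokens = aScan rest ln tokens := by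
  rw [aScan]; simp [h1, h2]

theorem aScan_ident (c : Char) (t rest : List Char) (ln : Int)
    (tokens : List (String × String × Int))
    (hc : (PySem.Chars.isalpha c || c == '_') = true)
    (ht : ∀ x ∈ t, pvIdentCont x = true)
    (hr : List.takeWhile pvIdentCont rest = []) :
    aScan (c :: (t ++ rest)) ln tokens
      = aScan rest ln (tokens ++ [("identifier", String.ofList (c :: t), ln)]) := by
  rw [aScan]
  have hdr : List.dropWhile pvIdentCont rest = rest := by
    rw [← drop_len_takeWhile, hr]; simp
  rw [List.takeWhile_append_of_pos ht, List.dropWhile_append_of_pos ht, hr, hdr]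
  simp [(start_ne c hc).1, start_not_space c hc, hc]

theorem aScan_dcolon (rest : List Char) (ln : Int)
    (tokens : List (String × String × Int)) :
    aScan (':' :: ':' :: rest) ln tokens = aScan rest ln (tokens ++ [("symbol", "::", ln)]) := by
  rw [aScan]
  simp [List.head?_cons, show PySem.Chars.isspace ':' = false from by decide,
    show PySem.Chars.isalpha ':' = false from by decide]

theorem aScan_colon (rest : List Char) (ln : Int)
    (tokens : List (String × String × Int)) (h : (rest.head? == some ':') = false) :
    aScan (':' :: rest) ln tokens = aScan rest ln (tokens ++ [("symbol", ":", ln)]) := by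
  rw [aScan]
  simp [h, List.head?_cons, show PySem.Chars.isspace ':' = false from by decide,
    show PySem.Chars.isalpha ':' = false from by decide,
    show String.ofList [':'] = ":" from rfl]

theorem aScan_sym (c : Char) (rest : List Char) (ln : Int)
    (tokens : List (String × String × Int)) (h1 : (c == '\n') = false)
    (h3 : (PySem.Chars.isalpha c || c == '_') = false) (h4 : (c == ':') = false)
    (h5 : (['{', '}', ';', '<', '>', '(', ')', ',', '[', ']', '='].contains c) = true) :
    aScan (c :: rest) ln tokens = aScan rest ln (tokens ++ [("symbol", String.ofList [c], ln)]) := by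
  rw [aScan, if_neg (by simp [h1]), if_neg (by simp [symB_not_space c h5]),
    if_neg (by simp [h3]), if_neg (by simp [h4]),
    if_pos (by simp only [symA_split, h4, Bool.false_or]; exact h5)]

theorem aScan_other (c : Char) (rest : List Char) (ln : Int)
    (tokens : List (String × String × Int)) (h1 : (c == '\n') = false)
    (h3 : (PySem.Chars.isalpha c || c == '_') = false) (h4 : (c == ':') = false)
    (h5 : (['{', '}', ';', '<', '>', '(', ')', ',', '[', ']', '='].contains c) = false) :
    aScan (c :: rest) ln tokens = aScan rest ln tokens := by
  by_cases hsp : PySem.Chars.isspace c = true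
  · exact aScan_space c rest ln tokens h1 hsp
  · rw [aScan, if_neg (by simp [h1]), if_neg (by simpa using hsp),
      if_neg (by simp [h3]), if_neg (by simp [h4]),
      if_neg (by simp only [symA_split, h4, Bool.false_or]; simpa using h5)]

theorem pvIfTrue : (if (true : Bool) = true then ([':'] : List Char) else []) = [':'] := rfl
theorem pvIfFalse : (if (false : Bool) = true then ([':'] : List Char) else []) = [] := rfl

theorem dfa_eq (l : List Char) : ∀ (tokens : List (String × String × Int))
    (ident : List Char) (pending : Bool) (ln : Int), '\n' ∉ l → pvIdentOk ident →
    (pending = true → ident = []) →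
    tcB_finish ln (l.foldl (tcB_step ln) (tokens, ident, pending))
      = aScan (ident ++ (if pending then [':'] else []) ++ l) ln tokens := by
  induction l with
  | nil =>
    intro tokens ident pending ln _ hok hpi
    match ident, hok with
    | [], _ =>
      cases pending
      · simp [tcB_finish, tcB_flushIdent, tcB_flushColon, aScan_nil]
      · have h := aScan_colon [] ln tokens (by simp)
        simp [tcB_finish, tcB_flushIdent, tcB_flushColon, h, aScan_nil]
    | c :: t, ⟨hc, ht⟩ =>
      have hpf : pending = false := by
        cases pending
        · rfl
        · exact absurd (hpi rfl) (by simp)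
      subst hpf
      simp only [List.foldl_nil, tcB_finish, tcB_flushIdent, tcB_flushColon,
        List.isEmpty_cons, if_false, Bool.false_eq_true, List.append_nil, List.nil_append]
      rw [show (c :: t) = c :: (t ++ []) by simp,
        aScan_ident c t [] ln tokens hc ht (by simp), aScan_nil]
      simp
  | cons ch l' ih =>
    intro tokens ident pending ln hnl hok hpi
    simp only [List.mem_cons, not_or] at hnl
    have hchn : (ch == '\n') = false := beq_eq_false_iff_ne.mpr (fun e => hnl.1 e.symm)
    have hnl' : '\n' ∉ l' := hnl.2
    rw [List.foldl_cons]
    by_cases h1 : (!ident.isEmpty && (PySem.Chars.isalnum ch || ch == '_')) = true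
    · -- continue the identifier buffer
      have hig : ident ≠ [] := by
        intro e; subst e; simp at h1
      have hpf : pending = false := by
        cases pending
        · rfl
        · exact absurd (hpi rfl) hig
      subst hpf
      have hstep : tcB_step ln (tokens, ident, false) ch = (tokens, ident ++ [ch], false) := by
        simp [tcB_step, h1]
      rw [hstep]
      have hok' : pvIdentOk (ident ++ [ch]) := by
        match ident, hok with
        | c :: t, ⟨hc, ht⟩ =>
          refine ⟨hc, ?_⟩
          intro x hx
          rcases List.mem_append.mp hx with e | e
          · exact ht x e
          · have : x = ch := by simpa using e
            subst this
            simp only [Bool.and_eq_true] at h1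
            exact h1.2
      rw [ih tokens (ident ++ [ch]) false ln hnl' hok' (by simp)]
      simp
    · by_cases h2 : (PySem.Chars.isalpha ch || ch == '_') = true
      · -- start a new identifier
        have hie : ident = [] := by
          by_contra hne
          apply h1
          simp only [Bool.and_eq_true]
          refine ⟨by simpa using hne, ?_⟩
          have := start_cont ch h2
          simpa [pvIdentCont] using this
        subst hie
        have hstep : tcB_step ln (tokens, [], pending) ch
            = (tcB_flushColon tokens pending ln, [ch], false) := by
          simp [tcB_step, h2]
        rw [hstep, ih (tcB_flushColon tokens pending ln) [ch] false ln hnl'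
          ⟨h2, by simp⟩ (by simp)]
        cases pending
        · simp [tcB_flushColon]
        · simp only [tcB_flushColon, if_pos rfl]
          simp only [List.nil_append, List.append_nil, List.cons_append, List.singleton_append, pvIfTrue, pvIfFalse, if_true, if_false]
          rw [aScan_colon (ch :: l') ln tokens
            (by simp [List.head?_cons, (start_ne ch h2).2])]
      · by_cases h3 : (ch == ':') = true
        · have hcheq : ch = ':' := by simpa using h3
          subst hcheq
          cases hp : pending
          · have hstep : tcB_step ln (tokens, ident, false) ':'
                = (tcB_flushIdent tokens ident ln, [], true) := by
              have ha1 : PySem.Chars.isalnum ':' = false := by decide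
              have ha2 : PySem.Chars.isalpha ':' = false := by decide
              simp [tcB_step, ha1, ha2]
            rw [hstep, ih (tcB_flushIdent tokens ident ln) [] true ln hnl' trivial (fun _ => rfl)]
            match ident, hok with
            | [], _ => simp [tcB_flushIdent]
            | c :: t, ⟨hc, ht⟩ =>
              simp only [tcB_flushIdent, List.isEmpty_cons, Bool.false_eq_true, if_false]
              simp only [List.nil_append, List.append_nil, List.cons_append, List.singleton_append, pvIfTrue, pvIfFalse, if_true, if_false]
              rw [aScan_ident c t (':' :: l') ln tokens hc ht
                (by simp [List.takeWhile_cons, show pvIdentCont ':' = false by decide])]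
          · have hie : ident = [] := hpi hp
            subst hie
            have hstep : tcB_step ln (tokens, [], true) ':'
                = (tokens ++ [("symbol", "::", ln)], [], false) := by
              have ha1 : PySem.Chars.isalnum ':' = false := by decide
              have ha2 : PySem.Chars.isalpha ':' = false := by decide
              simp [tcB_step, ha1, ha2, tcB_flushIdent]
            rw [hstep, ih (tokens ++ [("symbol", "::", ln)]) [] false ln hnl' trivial (by simp)]
            simp only [List.nil_append, List.append_nil, List.cons_append, List.singleton_append, pvIfTrue, pvIfFalse, if_true, if_false]
            rw [aScan_dcolon l' ln tokens]
        · -- plain symbol or skipped character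
          have hflush : aScan (ident ++ (if pending then [':'] else []) ++ ch :: l') ln tokens
              = aScan (ch :: l') ln (tcB_flushColon (tcB_flushIdent tokens ident ln) pending ln) := by
            match ident, hok with
            | [], _ =>
              cases hp : pending
              · simp [tcB_flushIdent, tcB_flushColon]
              · simp only [tcB_flushIdent, List.isEmpty_nil, if_true, tcB_flushColon, if_pos rfl]
                simp only [List.nil_append, List.append_nil, List.cons_append, List.singleton_append, pvIfTrue, pvIfFalse, if_true, if_false]
                rw [aScan_colon (ch :: l') ln tokens (by simp [List.head?_cons]; simpa using h3)]
            | c :: t, ⟨hc, ht⟩ =>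
              have hp : pending = false := by
                cases hpp : pending
                · rfl
                · exact absurd (hpi hpp) (by simp)
              subst hp
              simp only [tcB_flushIdent, tcB_flushColon, List.isEmpty_cons, Bool.false_eq_true,
                if_false]
              simp only [List.nil_append, List.append_nil, List.cons_append, List.singleton_append, pvIfTrue, pvIfFalse, if_true, if_false]
              rw [aScan_ident c t (ch :: l') ln tokens hc ht ?hstop]
              case hstop =>
                have hcont : pvIdentCont ch = false := by
                  simp only [List.isEmpty_cons, Bool.not_false, Bool.true_and,
                    Bool.not_eq_true] at h1
                  simpa [pvIdentCont] using h1
                simp [List.takeWhile_cons, hcont]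
          rw [hflush]
          by_cases h4 : (['{', '}', ';', '<', '>', '(', ')', ',', '[', ']', '='].contains ch) = true
          · have hstep : tcB_step ln (tokens, ident, pending) ch
                = (tcB_flushColon (tcB_flushIdent tokens ident ln) pending ln
                    ++ [("symbol", String.ofList [ch], ln)], [], false) := by
              simp only [tcB_step]
              rw [if_neg (by simpa using h1), if_neg (by simpa using h2),
                if_neg (by simpa using h3), if_pos h4]
            rw [hstep, ih _ [] false ln hnl' trivial (by simp),
              aScan_sym ch l' ln _ hchn (by simpa using h2) (by simpa using h3) h4]
            simp
          · have hstep : tcB_step ln (tokens, ident, pending) ch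
                = (tcB_flushColon (tcB_flushIdent tokens ident ln) pending ln, [], false) := by
              simp only [tcB_step]
              rw [if_neg (by simpa using h1), if_neg (by simpa using h2),
                if_neg (by simpa using h3), if_neg (by simpa using h4)]
            rw [hstep, ih _ [] false ln hnl' trivial (by simp),
              aScan_other ch l' ln _ hchn (by simpa using h2) (by simpa using h3) (by simpa using h4)]
            simp

theorem line_eq (l : List Char) (tokens : List (String × String × Int)) (ln : Int)
    (hnl : '\n' ∉ l) : tcB_line tokens ln l = aScan l ln tokens := by
  have h := dfa_eq l tokens [] false ln hnl trivial (by simp)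
  simpa [tcB_line, tcB_finish] using h

-- ---- bridge 4: splitOn facts and the top-level assembly ----

theorem splitOn_no_nl (xs : List Char) (h : '\n' ∉ xs) : xs.splitOn '\n' = [xs] := by
  induction xs with
  | nil => simp [List.splitOn, List.splitOnP_nil]
  | cons c t ih =>
    simp only [List.mem_cons, not_or] at h
    have hc : (c == '\n') = false := beq_eq_false_iff_ne.mpr (fun e => h.1 e.symm)
    simp only [List.splitOn, List.splitOnP_cons, hc, if_false]
    have := ih h.2
    simp only [List.splitOn] at this
    rw [this]
    simp [List.modifyHead]


theorem splitOn_append_nl (xs ys : List Char) (h : '\n' ∉ xs) :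
    (xs ++ '\n' :: ys).splitOn '\n' = xs :: ys.splitOn '\n' := by
  induction xs with
  | nil => simp [List.splitOn, List.splitOnP_cons]
  | cons c t ih =>
    simp only [List.mem_cons, not_or] at h
    have hc : (c == '\n') = false := beq_eq_false_iff_ne.mpr (fun e => h.1 e.symm)
    simp only [List.cons_append, List.splitOn, List.splitOnP_cons, hc, if_false]
    have := ih h.2
    simp only [List.splitOn] at this
    rw [this]
    simp [List.modifyHead]


theorem first_nl_split (cs : List Char) (h : '\n' ∈ cs) :
    cs = cs.takeWhile (· != '\n') ++ '\n' :: (cs.dropWhile (· != '\n')).tail := by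
  induction cs with
  | nil => simp at h
  | cons c t ih =>
    by_cases hc : c = '\n'
    · subst hc; simp [List.takeWhile_cons, List.dropWhile_cons]
    · have ht : '\n' ∈ t := by
        rcases List.mem_cons.mp h with h1 | h1
        · exact absurd h1.symm hc
        · exact h1
      simp only [List.takeWhile_cons, List.dropWhile_cons, bne_iff_ne, ne_eq, hc,
        not_false_iff, if_true, List.cons_append]
      exact congrArg (c :: ·) (ih ht)


theorem tcB_line_nil (tokens : List (String × String × Int)) (line : Int) :
    tcB_line tokens line [] = tokens := by
  simp [tcB_line, tcB_flushIdent, tcB_flushColon]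

theorem aScan_eq_bLines_aux (N : Nat) : ∀ (cs : List Char) (line : Int)
    (tokens : List (String × String × Int)), cs.length ≤ N →
    aScan cs line tokens = bLines (cs.splitOn '\n') line tokens := by
  induction N with
  | zero =>
    intro cs line tokens hlen
    have : cs = [] := List.eq_nil_of_length_eq_zero (by omega)
    subst this
    rw [aScan_nil, splitOn_no_nl [] (by simp), bLines, bLines, tcB_line_nil]
  | succ N ih =>
    intro cs line tokens hlen
    by_cases h : '\n' ∈ cs
    · have hsplit := first_nl_split cs h
      set l := cs.takeWhile (· != '\n') with hl
      set r := (cs.dropWhile (· != '\n')).tail with hr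
      have hnl : '\n' ∉ l := fun hm => by
        have := List.mem_takeWhile_imp hm; simp at this
      have hrlen : r.length ≤ N := by
        have := congrArg List.length hsplit
        simp at this; omega
      rw [hsplit, aScan_append_nl l r line tokens hnl, splitOn_append_nl l r hnl,
        bLines, line_eq l tokens line hnl, ih r (line + 1) (aScan l line tokens) hrlen]
    · rw [splitOn_no_nl cs h, bLines, bLines, line_eq cs tokens line h]

theorem aScan_eq_bLines (cs : List Char) (line : Int)
    (tokens : List (String × String × Int)) :
    aScan cs line tokens = bLines (cs.splitOn '\n') line tokens :=
  aScan_eq_bLines_aux cs.length cs line tokens le_rfl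

theorem zipIdx_foldl_eq_bLines (ls : List (List Char)) (k : Nat)
    (tokens : List (String × String × Int)) :
    (ls.zipIdx k).foldl (fun tokens p => tcB_line tokens (p.2 : Int) p.1) tokens
      = bLines ls (k : Int) tokens := by
  induction ls generalizing k tokens with
  | nil => simp [bLines]
  | cons l ls ih =>
    rw [List.zipIdx_cons, List.foldl_cons]
    rw [ih (k + 1)]
    simp [bLines]

-- ===== VERDICT (by name: the statement is the Claim_ definition above) =====
theorem tokenize_cpp_spec : Claim_equal_tokenize_cpp := by
  intro content _
  unfold Spec_tokenize_cpp tokenize_cpp tokenize_cpp_alt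
  rw [loop_eq_aScan, List.drop_zero, aScan_eq_bLines, zipIdx_foldl_eq_bLines]
  norm_num
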